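-- pv_equiv track=rewrite | github.com/tongjingqi/Game-RL | 3d_maze/main.py | normalize_height_relation
-- ===== SOURCE A (Python) =====
-- def normalize_height_relation(heights):
--     """Convert raw heights into a valid relation string that matches possible_relations format"""
--     # Sort points by height, then by label for equal heights
--     sorted_points = sorted(heights, key=lambda x: (x[1], x[0]))
--
--     # Build relation string ensuring valid format
--     relations = []
--     current_height = None
--     current_group = []
--
--     # Group points by height
--     for label, height in sorted_points:
--         if height != current_height:
--             if current_group:
--                 relations.append(current_group)
--             current_group = [label]
--             current_height = height
--         else:
--             current_group.append(label)
--     relations.append(current_group)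
--
--     # Convert groups into relation string
--     result = []
--     for i, group in enumerate(relations):
--         # Sort labels within group
--         group.sort()
--         result.append(" = ".join(str(x) for x in group))
--
--     return " < ".join(result)
-- ===== SOURCE B (Python) =====
-- def normalize_height_relation(heights):
--     """Convert raw heights into a valid relation string that matches possible_relations format"""
--     groups = {}
--     for label, h in heights:
--         groups[h] = groups.get(h, []) + [label]
--     return " < ".join(" = ".join(str(x) for x in sorted(groups[h])) for h in sorted(groups))
-- ===== Notes on version B (the rewrite author's own statement) =====
-- stated objective: simpler
-- what changed: A sorts the pairs by (height,label) and runs a current-height state machine over the sorted list to build consecutive groups; B never pre-sorts: it builds a height->labels dict in one pass and emits sorted labels per sorted key.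
import Mathlib
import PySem

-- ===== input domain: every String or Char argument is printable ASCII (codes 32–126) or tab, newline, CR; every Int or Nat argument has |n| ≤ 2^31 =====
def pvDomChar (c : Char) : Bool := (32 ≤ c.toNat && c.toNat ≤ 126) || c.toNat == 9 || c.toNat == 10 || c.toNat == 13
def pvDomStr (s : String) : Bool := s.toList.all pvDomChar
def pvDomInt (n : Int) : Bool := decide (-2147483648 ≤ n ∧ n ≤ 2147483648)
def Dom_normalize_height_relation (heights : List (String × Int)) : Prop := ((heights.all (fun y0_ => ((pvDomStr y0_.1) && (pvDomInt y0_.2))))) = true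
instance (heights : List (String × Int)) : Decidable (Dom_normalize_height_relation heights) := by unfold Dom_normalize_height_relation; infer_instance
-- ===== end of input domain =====

-- B replaces A's sort-then-state-machine grouping with a height→labels dict built in one
-- pass, read off over sorted keys (objective: simpler; return values proved equal).

-- ===== PORT A =====
-- the grouping loop of A: state (current_height, current_group, relations); the final
-- 'relations.append(current_group)' is the [] case
def pvAGroup : List (String × Int) → Option Int → List String → List (List String) → List (List String)
  | [], _, g, rels => rels ++ [g]
  | (label, h) :: t, cur, g, rels =>
    if some h ≠ cur then
      pvAGroup t (some h) [label] (if g ≠ [] then rels ++ [g] else rels)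
    else
      pvAGroup t cur (g ++ [label]) rels

def normalize_height_relation (heights : List (String × Int)) : String :=
  let sorted_points := PySem.List.sorted2 heights (fun x => x.2) (fun x => x.1)
  let relations := pvAGroup sorted_points none [] []
  -- 'for i, group in enumerate(relations): group.sort(); result.append(" = ".join(...))' (i unused)
  let result := relations.foldl
    (fun res g => res ++ [PySem.Str.join " = " (PySem.List.sorted g (fun x => x))]) []
  PySem.Str.join " < " result

-- ===== PORT B =====
def normalize_height_relation_alt (heights : List (String × Int)) : String :=
  -- groups[h] = groups.get(h, []) + [label]
  let groups := heights.foldl (fun d p => d.modify p.2 [] (fun g => g ++ [p.1])) PySem.Dict.empty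
  PySem.Str.join " < "
    ((PySem.List.sorted groups.keys (fun x => x)).map
      (fun h => PySem.Str.join " = " (PySem.List.sorted (groups.getD h []) (fun x => x))))

-- ===== PRECONDITION & SPEC =====
def Spec_normalize_height_relation (heights : List (String × Int)) (out : String) : Prop := out = normalize_height_relation_alt heights
instance (heights : List (String × Int)) (out : String) : Decidable (Spec_normalize_height_relation heights out) := by unfold Spec_normalize_height_relation; infer_instance

-- ===== CLAIM (what is proved, stated in full; the proofs are below) =====
def Claim_equal_normalize_height_relation : Prop := ∀ (heights : List (String × Int)), Dom_normalize_height_relation heights → Spec_normalize_height_relation heights (normalize_height_relation heights)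

-- ===== LEMMAS AND PROOFS =====

-- grouping of a run-sorted list, written as a structural recursion (proof-side spec of A's loop)
def pvRuns (h : Int) (g : List String) : List (String × Int) → List (List String)
  | [] => [g]
  | (l, h') :: t => if h' = h then pvRuns h (g ++ [l]) t else g :: pvRuns h' [l] t

-- the distinct heights of a run-sorted list, current height first
def pvRunKeys (h : Int) : List (String × Int) → List Int
  | [] => [h]
  | (_, h') :: t => if h' = h then pvRunKeys h t else h :: pvRunKeys h' t

lemma pvAGroup_eq_runs (t : List (String × Int)) : ∀ (h : Int) (g : List String)
    (rels : List (List String)), g ≠ [] →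
    pvAGroup t (some h) g rels = rels ++ pvRuns h g t := by
  induction t with
  | nil => intro h g rels _; simp [pvAGroup, pvRuns]
  | cons p t ih =>
    obtain ⟨l', h'⟩ := p
    intro h g rels hg
    by_cases hh : h' = h
    · subst hh
      simp only [pvAGroup, pvRuns, reduceIte]
      simpa using ih h' (g ++ [l']) rels (by simp)
    · have hne : (some h' ≠ some h) := by simpa using hh
      simp only [pvAGroup, pvRuns, hne, hh, hg, reduceIte, ite_not]
      rw [ih h' [l'] (rels ++ [g]) (by simp)]
      simp

lemma pvRunKeys_ge (t : List (String × Int)) : ∀ (h : Int),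
    (∀ p ∈ t, h ≤ p.2) → t.Pairwise (fun a b => a.2 ≤ b.2) →
    ∀ k ∈ pvRunKeys h t, h ≤ k := by
  induction t with
  | nil => intro h _ _ k hk; simp [pvRunKeys] at hk; simp [hk]
  | cons p t ih =>
    obtain ⟨l', h'⟩ := p
    intro h hmin hp k hk
    rcases List.pairwise_cons.mp hp with ⟨hhd, htl⟩
    by_cases hh : h' = h
    · subst hh
      simp only [pvRunKeys, reduceIte] at hk
      exact ih h' (fun p hp => hhd p hp) htl k hk
    · have hle : h ≤ h' := hmin (l', h') (by simp)
      simp only [pvRunKeys, hh, reduceIte, List.mem_cons] at hk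
      rcases hk with rfl | hk
      · omega
      · exact le_trans hle (ih h' (fun p hp => hhd p hp) htl k hk)

lemma pvRunKeys_mem (t : List (String × Int)) : ∀ (h k : Int),
    (k ∈ pvRunKeys h t ↔ k = h ∨ k ∈ t.map (fun p => p.2)) := by
  induction t with
  | nil => intro h k; simp [pvRunKeys]
  | cons p t ih =>
    obtain ⟨l', h'⟩ := p
    intro h k
    by_cases hh : h' = h
    · subst hh
      simp only [pvRunKeys, reduceIte, List.map_cons, List.mem_cons, ih]
      tauto
    · simp only [pvRunKeys, hh, reduceIte, List.map_cons, List.mem_cons, ih]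

lemma pvRunKeys_lt (t : List (String × Int)) : ∀ (h : Int),
    (∀ p ∈ t, h ≤ p.2) → t.Pairwise (fun a b => a.2 ≤ b.2) →
    (pvRunKeys h t).Pairwise (· < ·) := by
  induction t with
  | nil => intro h _ _; simp [pvRunKeys]
  | cons p t ih =>
    obtain ⟨l', h'⟩ := p
    intro h hmin hp
    rcases List.pairwise_cons.mp hp with ⟨hhd, htl⟩
    by_cases hh : h' = h
    · subst hh
      simp only [pvRunKeys, reduceIte]
      exact ih h' (fun p hp => hhd p hp) htl
    · have hlt : h < h' := lt_of_le_of_ne (hmin (l', h') (by simp)) (Ne.symm hh)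
      simp only [pvRunKeys, hh, reduceIte]
      refine List.pairwise_cons.mpr ⟨fun k hk => ?_, ih h' (fun p hp => hhd p hp) htl⟩
      exact lt_of_lt_of_le hlt (pvRunKeys_ge t h' (fun p hp => hhd p hp) htl k hk)

lemma pvRuns_spec (t : List (String × Int)) : ∀ (h : Int) (g : List String),
    t.Pairwise (fun a b => a.2 ≤ b.2) → (∀ p ∈ t, h ≤ p.2) →
    pvRuns h g t = (pvRunKeys h t).map
      (fun k => (if k = h then g else []) ++ (t.filter (fun p => p.2 == k)).map (fun p => p.1)) := by
  induction t with
  | nil => intro h g _ _; simp [pvRuns, pvRunKeys]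
  | cons p t ih =>
    obtain ⟨l', h'⟩ := p
    intro h g hp hmin
    rcases List.pairwise_cons.mp hp with ⟨hhd, htl⟩
    by_cases hh : h' = h
    · subst hh
      simp only [pvRuns, pvRunKeys, reduceIte]
      rw [ih h' (g ++ [l']) htl (fun p hp => hhd p hp)]
      refine List.map_congr_left ?_
      intro k _
      by_cases hkh : k = h'
      · subst hkh; simp
      · simp [hkh, Ne.symm hkh, beq_iff_eq]
    · have hlt : h < h' := lt_of_le_of_ne (hmin (l', h') (by simp)) (Ne.symm hh)
      simp only [pvRuns, pvRunKeys, hh, reduceIte, List.map_cons]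
      have htail0 : ∀ p ∈ t, h' ≤ p.2 := fun p hp => hhd p hp
      congr 1
      · -- head group: g, since nothing else has height h
        have hnil : (((l', h') :: t).filter (fun p => p.2 == h)) = [] := by
          refine List.filter_eq_nil_iff.mpr ?_
          intro p hp
          rcases List.mem_cons.mp hp with rfl | hp
          · simp [beq_iff_eq]; omega
          · have := htail0 p hp; simp [beq_iff_eq]; omega
        simp [hnil]
      · rw [ih h' [l'] htl htail0]
        refine List.map_congr_left ?_
        intro k hk
        have hge : h' ≤ k := pvRunKeys_ge t h' htail0 htl k hk
        have hkne : ¬ k = h := by omega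
        by_cases hkh : k = h'
        · subst hkh; simp [hkne]
        · simp [hkne, hkh, Ne.symm hkh, beq_iff_eq]

lemma pvInsertBy_pairwise {α : Type} (R : α → α → Prop) (htrans : ∀ {a b c}, R a b → R b c → R a c)
    (before : α → α → Bool)
    (h1 : ∀ a b, before a b = true → R a b) (h2 : ∀ a b, before a b = false → R b a)
    (x : α) (ys : List α) (hys : ys.Pairwise R) :
    (PySem.List.insertBy before x ys).Pairwise R := by
  induction ys with
  | nil => simp [PySem.List.insertBy]
  | cons y ys ih =>
    rcases List.pairwise_cons.mp hys with ⟨hy, hys'⟩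
    by_cases hb : before x y = true
    · simp only [PySem.List.insertBy, hb, if_pos]
      exact List.pairwise_cons.mpr ⟨fun z hz => by
        rcases List.mem_cons.mp hz with rfl | hz
        · exact h1 _ _ hb
        · exact htrans (h1 _ _ hb) (hy z hz), hys⟩
    · simp only [PySem.List.insertBy, hb, if_neg, Bool.not_eq_true]
      refine List.pairwise_cons.mpr ⟨fun z hz => ?_, ih hys'⟩
      rcases (PySem.List.mem_insertBy before x z ys).mp hz with rfl | hz
      · exact h2 _ _ (by simpa using hb)
      · exact hy z hz

lemma pvFoldl_insertBy_pairwise {α : Type} (R : α → α → Prop)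
    (htrans : ∀ {a b c}, R a b → R b c → R a c) (before : α → α → Bool)
    (h1 : ∀ a b, before a b = true → R a b) (h2 : ∀ a b, before a b = false → R b a)
    (xs : List α) : ∀ (acc : List α), acc.Pairwise R →
    (xs.foldl (fun acc x => PySem.List.insertBy before x acc) acc).Pairwise R := by
  induction xs with
  | nil => intro acc hacc; simpa using hacc
  | cons x xs ih =>
    intro acc hacc
    exact ih _ (pvInsertBy_pairwise R htrans before h1 h2 x acc hacc)

lemma pvSorted2_pairwise (heights : List (String × Int)) :
    (PySem.List.sorted2 heights (fun x => x.2) (fun x => x.1)).Pairwise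
      (fun a b => a.2 ≤ b.2) := by
  unfold PySem.List.sorted2
  simp only [reduceIte, Bool.false_eq_true]
  refine pvFoldl_insertBy_pairwise _
    (fun {a b c} (hab : a.2 ≤ b.2) (hbc : b.2 ≤ c.2) => le_trans hab hbc) _ ?_ ?_ heights [] (by simp)
  · intro a b hb
    simp only [Bool.or_eq_true, Bool.and_eq_true, decide_eq_true_eq, Bool.not_eq_eq_eq_not,
      Bool.not_true, decide_eq_false_iff_not, not_lt] at hb
    rcases hb with hb | ⟨hb, _⟩
    · exact le_of_lt hb
    · exact hb
  · intro a b hb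
    simp only [Bool.or_eq_false_iff, Bool.and_eq_false_iff, decide_eq_false_iff_not,
      not_lt] at hb
    exact hb.1

-- ===== VERDICT (by name: the statement is the Claim_ definition above) =====
theorem normalize_height_relation_spec : Claim_equal_normalize_height_relation := by
  intro heights _
  unfold Spec_normalize_height_relation normalize_height_relation normalize_height_relation_alt
  dsimp only
  have hperm : (PySem.List.sorted2 heights (fun x => x.2) (fun x => x.1)).Perm heights :=
    PySem.List.sorted2_perm heights _ _ false
  have hpair := pvSorted2_pairwise heights
  -- the dict of B
  have hkeys : (heights.foldl (fun d p => d.modify p.2 [] (fun g => g ++ [p.1]))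
      (PySem.Dict.empty : PySem.Dict Int (List String))).keys
      = PySem.Set.ofList (heights.map (fun p => p.2)) := by
    simpa [PySem.Dict.keys_empty, PySem.Set.update_empty] using
      PySem.Dict.keys_foldl_modify_key heights (fun p => p.2) ([] : List String)
        (fun _ p => fun g => g ++ [p.1]) PySem.Dict.empty
  have hgetD : ∀ k : Int, (heights.foldl (fun d p => d.modify p.2 [] (fun g => g ++ [p.1]))
      (PySem.Dict.empty : PySem.Dict Int (List String))).getD k []
      = (heights.filter (fun p => p.2 == k)).map (fun p => p.1) := by
    intro k
    have hswap : heights.foldl (fun d p => d.modify p.2 [] (fun g => g ++ [p.1]))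
        (PySem.Dict.empty : PySem.Dict Int (List String))
        = (heights.map (fun p => (p.2, p.1))).foldl
            (fun d q => d.modify q.1 [] (fun g => g ++ [q.2])) PySem.Dict.empty := by
      rw [List.foldl_map]
    rw [hswap, PySem.Dict.getD_foldl_modify_append]
    simp [List.filter_map, List.map_map, Function.comp_def]
  rcases hspc : PySem.List.sorted2 heights (fun x => x.2) (fun x => x.1) with _ | ⟨⟨l, h⟩, t⟩
  · -- heights is empty: both sides are ""
    have hnil : heights = [] := (hspc ▸ hperm).symm.eq_nil
    subst hnil
    rfl
  · rw [hspc] at hperm hpair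
    rcases List.pairwise_cons.mp hpair with ⟨hhd, htl⟩
    have hmin : ∀ p ∈ t, h ≤ p.2 := fun p hp => hhd p hp
    -- A's grouping loop = map over the distinct heights
    have hA : pvAGroup ((l, h) :: t) none [] [] = (pvRunKeys h t).map
        (fun k => (if k = h then [l] else []) ++ (t.filter (fun p => p.2 == k)).map (fun p => p.1)) := by
      show pvAGroup ((l, h) :: t) none [] [] = _
      rw [show pvAGroup ((l, h) :: t) none [] [] = pvAGroup t (some h) [l] [] by
        simp [pvAGroup]]
      rw [pvAGroup_eq_runs t h [l] [] (by simp)]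
      simpa using pvRuns_spec t h [l] htl hmin
    -- B's key list = the distinct heights, in A's order
    have hkeysort : PySem.List.sorted (PySem.Set.ofList (heights.map (fun p => p.2)))
        (fun x => x) = pvRunKeys h t := by
      refine PySem.List.sorted_eq_of_perm_of_pairwise_lt
        (PySem.Set.ofList (heights.map (fun p => p.2))) (pvRunKeys h t) (fun x => x) ?_ ?_
      · refine (List.perm_ext_iff_of_nodup
          ((pvRunKeys_lt t h hmin htl).imp (fun hlt => ne_of_lt hlt))
          (PySem.Set.nodup_ofList _)).mpr ?_
        intro k
        rw [pvRunKeys_mem t h k, PySem.Set.mem_ofList]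
        have : k ∈ heights.map (fun p => p.2) ↔ k ∈ ((l, h) :: t).map (fun p => p.2) :=
          (hperm.map (fun p => p.2)).mem_iff.symm
        rw [this]
        simp [eq_comm]
      · exact pvRunKeys_lt t h hmin htl
    rw [hA, PySem.List.foldl_append_singleton_eq_map, hkeys, hkeysort]
    simp only [List.nil_append, List.map_map]
    congr 1
    refine List.map_congr_left ?_
    intro k _
    simp only [Function.comp_apply, hgetD k]
    congr 1
    rw [PySem.List.sorted_id_eq_sorted_id_iff_perm]
    have hfk : (if k = h then [l] else []) ++ (t.filter (fun p => p.2 == k)).map (fun p => p.1)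
        = ((((l, h) :: t)).filter (fun p => p.2 == k)).map (fun p => p.1) := by
      by_cases hkh : k = h
      · subst hkh; simp
      · simp [hkh, Ne.symm hkh, beq_iff_eq]
    rw [hfk]
    exact ((hperm.filter (fun p => p.2 == k)).map (fun p => p.1))
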